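-- pv_equiv track=rewrite | github.com/marceloarantes19/PO | heuristicasEmetaheuristicas/algoritmosGeneticos.py | selecao
-- ===== SOURCE A (Python) =====
-- def selecao(populacao, fitness, novaPopulacao, novoFitness):
--   n = len(populacao)
--   ret = []
--   retFit = []
--   while len(ret)<n:
--     ret.append(populacao.pop(0) if fitness[0]>novoFitness[0] else novaPopulacao.pop(0))
--     retFit.append(fitness.pop(0) if fitness[0]>novoFitness[0] else novoFitness.pop(0))
--   return ret, retFit
-- ===== SOURCE B (Python) =====
-- def selecao(populacao, fitness, novaPopulacao, novoFitness):
--     n = len(populacao)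
--     i = j = 0
--     ret = []
--     retFit = []
--     while i + j < n:
--         if fitness[i] > novoFitness[j]:
--             ret.append(populacao[i])
--             retFit.append(fitness[i])
--             i += 1
--         else:
--             ret.append(novaPopulacao[j])
--             retFit.append(novoFitness[j])
--             j += 1
--     return ret, retFit
-- ===== Notes on version B (the rewrite author's own statement) =====
-- stated objective: faster
-- what changed: B replaces A's repeated list.pop(0) head-removal (each pop shifts the whole remaining list) with a two-pointer index merge over the unmodified input lists, and as a side effect no longer mutates its arguments.
-- outside the precondition, e.g. on selecao([1, 2], [9, 9], [0], [0]): A returns ([1, 2], [9, 9]), B returns ([1, 2], [9, 9])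
import Mathlib
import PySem

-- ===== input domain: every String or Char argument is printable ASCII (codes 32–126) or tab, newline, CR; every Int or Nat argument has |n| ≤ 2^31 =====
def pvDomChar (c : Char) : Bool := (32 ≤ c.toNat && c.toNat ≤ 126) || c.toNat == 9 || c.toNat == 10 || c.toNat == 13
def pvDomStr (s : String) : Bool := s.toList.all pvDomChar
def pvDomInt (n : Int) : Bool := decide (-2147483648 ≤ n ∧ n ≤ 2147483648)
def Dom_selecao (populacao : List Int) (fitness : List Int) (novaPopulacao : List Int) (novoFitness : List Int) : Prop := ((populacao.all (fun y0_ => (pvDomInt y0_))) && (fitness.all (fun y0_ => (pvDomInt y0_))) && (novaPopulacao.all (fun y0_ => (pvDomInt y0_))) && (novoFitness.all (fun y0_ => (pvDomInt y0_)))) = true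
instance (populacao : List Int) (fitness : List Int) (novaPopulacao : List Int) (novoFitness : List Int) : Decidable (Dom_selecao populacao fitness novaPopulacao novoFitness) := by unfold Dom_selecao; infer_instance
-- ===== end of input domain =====

-- B replaces A's repeated pop(0) head-removal with a two-pointer index merge (faster: O(n) vs O(n^2)).
-- A mutates all four argument lists in place (pop(0)); B does not — the equivalence proved here is about the RETURN value only.

-- ===== PORT A =====
-- while len(ret) < n: two appends per iteration, each popping a head after re-checking fitness[0] > novoFitness[0].
-- fuel = n: each completed iteration grows ret by one, so n iterations suffice; on an index/pop failure
-- (where Python raises, outside Pre_) the loop stops and returns the accumulators.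
def selecaoGo (n : Nat) (fuel : Nat) (pop fit nov novF ret retFit : List Int) :
    List Int × List Int :=
  match fuel with
  | 0 => (ret, retFit)
  | fuel + 1 =>
    if ret.length < n then
      match PySem.List.pyGet? fit 0, PySem.List.pyGet? novF 0 with
      | some f0, some g0 =>
        match (if f0 > g0 then PySem.List.pop? pop 0 else PySem.List.pop? nov 0) with
        | some (x, rest1) =>
          let pop' := if f0 > g0 then rest1 else pop
          let nov' := if f0 > g0 then nov else rest1
          let ret' := ret ++ [x]
          -- second line: the condition is re-evaluated (fit/novF unchanged by the first pop)
          match PySem.List.pyGet? fit 0, PySem.List.pyGet? novF 0 with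
          | some f1, some g1 =>
            match (if f1 > g1 then PySem.List.pop? fit 0 else PySem.List.pop? novF 0) with
            | some (y, rest2) =>
              let fit' := if f1 > g1 then rest2 else fit
              let novF' := if f1 > g1 then novF else rest2
              selecaoGo n fuel pop' fit' nov' novF' ret' (retFit ++ [y])
            | none => (ret', retFit)
          | _, _ => (ret', retFit)
        | none => (ret, retFit)
      | _, _ => (ret, retFit)
    else (ret, retFit)

def selecao (populacao : List Int) (fitness : List Int) (novaPopulacao : List Int) (novoFitness : List Int) : List Int × List Int :=
  selecaoGo populacao.length populacao.length populacao fitness novaPopulacao novoFitness [] []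

-- ===== PORT B =====
-- two-pointer merge: while i + j < n, compare fitness[i] with novoFitness[j], copy from the winning side.
-- fuel = n: each iteration increases i + j by one; on an index failure (outside Pre_) it stops.
def selecaoAltGo (n : Nat) (fuel : Nat) (populacao fitness novaPopulacao novoFitness : List Int)
    (i j : Nat) (ret retFit : List Int) : List Int × List Int :=
  match fuel with
  | 0 => (ret, retFit)
  | fuel + 1 =>
    if i + j < n then
      match PySem.List.pyGet? fitness (i : Int), PySem.List.pyGet? novoFitness (j : Int) with
      | some fi, some gj =>
        if fi > gj then
          match PySem.List.pyGet? populacao (i : Int) with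
          | some x =>
            selecaoAltGo n fuel populacao fitness novaPopulacao novoFitness (i + 1) j
              (ret ++ [x]) (retFit ++ [fi])
          | none => (ret, retFit)
        else
          match PySem.List.pyGet? novaPopulacao (j : Int) with
          | some x =>
            selecaoAltGo n fuel populacao fitness novaPopulacao novoFitness i (j + 1)
              (ret ++ [x]) (retFit ++ [gj])
          | none => (ret, retFit)
      | _, _ => (ret, retFit)
    else (ret, retFit)

def selecao_alt (populacao : List Int) (fitness : List Int) (novaPopulacao : List Int) (novoFitness : List Int) : List Int × List Int :=
  selecaoAltGo populacao.length populacao.length populacao fitness novaPopulacao novoFitness 0 0 [] []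

-- ===== PRECONDITION & SPEC =====
-- Pre_ excludes inputs on which A can raise IndexError mid-merge: it requires fitness, novaPopulacao and
-- novoFitness to be at least as long as populacao (both pointers stay below n = len(populacao), so every
-- head comparison and pop is then in range). It is slightly narrower than A's exact crash set: on a
-- shorter list A can still return when the comparisons happen never to reach its end.
def Pre_selecao (populacao : List Int) (fitness : List Int) (novaPopulacao : List Int) (novoFitness : List Int) : Prop :=
  populacao.length ≤ fitness.length ∧ populacao.length ≤ novoFitness.length ∧
    populacao.length ≤ novaPopulacao.length
instance (populacao : List Int) (fitness : List Int) (novaPopulacao : List Int) (novoFitness : List Int) : Decidable (Pre_selecao populacao fitness novaPopulacao novoFitness) := by unfold Pre_selecao; infer_instance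

def pvWitness_selecao : List Int × List Int × List Int × List Int :=
  ([10, 20], [3, 1], [30, 40], [2, 5])

def Spec_selecao (populacao : List Int) (fitness : List Int) (novaPopulacao : List Int) (novoFitness : List Int) (out : List Int × List Int) : Prop := out = selecao_alt populacao fitness novaPopulacao novoFitness
instance (populacao : List Int) (fitness : List Int) (novaPopulacao : List Int) (novoFitness : List Int) (out : List Int × List Int) : Decidable (Spec_selecao populacao fitness novaPopulacao novoFitness out) := by unfold Spec_selecao; infer_instance

-- ===== CLAIM (what is proved, stated in full; the proofs are below) =====
def Claim_equal_selecao : Prop := ∀ (populacao : List Int) (fitness : List Int) (novaPopulacao : List Int) (novoFitness : List Int), Dom_selecao populacao fitness novaPopulacao novoFitness → Pre_selecao populacao fitness novaPopulacao novoFitness → Spec_selecao populacao fitness novaPopulacao novoFitness (selecao populacao fitness novaPopulacao novoFitness)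

-- ===== LEMMAS AND PROOFS =====

-- loop invariant: A's four lists are the drops of the originals at the two pointers,
-- the accumulators coincide, ret.length = i + j and i + j + fuel = n.
theorem selecaoGo_eq_altGo (pop fit nov novF : List Int)
    (hn : pop.length ≤ fit.length) (hm : pop.length ≤ novF.length)
    (hmn : pop.length ≤ nov.length) :
    ∀ (fuel i j : Nat) (ret retFit : List Int),
      ret.length = i + j → i + j + fuel = pop.length →
      selecaoGo pop.length fuel (pop.drop i) (fit.drop i) (nov.drop j) (novF.drop j) ret retFit
        = selecaoAltGo pop.length fuel pop fit nov novF i j ret retFit := by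
  intro fuel
  induction fuel with
  | zero => intro i j ret retFit _ _; rfl
  | succ fuel ih =>
    intro i j ret retFit hret hfuel
    have hij : i + j < pop.length := by omega
    have hi : i < fit.length := by omega
    have hj : j < novF.length := by omega
    have hi' : i < pop.length := by omega
    have hj' : j < nov.length := by omega
    have hfit : PySem.List.pyGet? (fit.drop i) 0 = some fit[i] := by
      simp [PySem.List.pyGet?_zero, List.getElem?_drop, hi]
    have hnovF : PySem.List.pyGet? (novF.drop j) 0 = some novF[j] := by
      simp [PySem.List.pyGet?_zero, hj]
    have hfitI : PySem.List.pyGet? fit (i : Int) = some fit[i] := by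
      simp [hi]
    have hnovFJ : PySem.List.pyGet? novF (j : Int) = some novF[j] := by
      simp [hj]
    have hpopI : PySem.List.pyGet? pop (i : Int) = some pop[i] := by
      simp [hi']
    have hnovJ : PySem.List.pyGet? nov (j : Int) = some nov[j] := by
      simp [hj']
    have hdpop : pop.drop i = pop[i] :: pop.drop (i + 1) := List.drop_eq_getElem_cons hi'
    have hdfit : fit.drop i = fit[i] :: fit.drop (i + 1) := List.drop_eq_getElem_cons hi
    have hdnov : nov.drop j = nov[j] :: nov.drop (j + 1) := List.drop_eq_getElem_cons hj'
    have hdnovF : novF.drop j = novF[j] :: novF.drop (j + 1) := List.drop_eq_getElem_cons hj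
    by_cases hc : fit[i] > novF[j]
    · rw [show selecaoAltGo pop.length (fuel + 1) pop fit nov novF i j ret retFit
            = selecaoAltGo pop.length fuel pop fit nov novF (i + 1) j
                (ret ++ [pop[i]]) (retFit ++ [fit[i]]) by
        simp [selecaoAltGo, hij, hfitI, hnovFJ, hc, hpopI]]
      rw [show selecaoGo pop.length (fuel + 1) (pop.drop i) (fit.drop i) (nov.drop j) (novF.drop j) ret retFit
            = selecaoGo pop.length fuel (pop.drop (i + 1)) (fit.drop (i + 1)) (nov.drop j) (novF.drop j)
                (ret ++ [pop[i]]) (retFit ++ [fit[i]]) by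
        have hpp : PySem.List.pop? (pop.drop i) 0 = some (pop[i], pop.drop (i + 1)) := by
          rw [hdpop]; exact PySem.List.pop?_zero_cons _ _
        have hpf : PySem.List.pop? (fit.drop i) 0 = some (fit[i], fit.drop (i + 1)) := by
          rw [hdfit]; exact PySem.List.pop?_zero_cons _ _
        simp [selecaoGo, hret, hij, hfit, hnovF, hc, hpp, hpf]]
      exact ih (i + 1) j _ _ (by simp [hret]; omega) (by omega)
    · rw [show selecaoAltGo pop.length (fuel + 1) pop fit nov novF i j ret retFit
            = selecaoAltGo pop.length fuel pop fit nov novF i (j + 1)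
                (ret ++ [nov[j]]) (retFit ++ [novF[j]]) by
        simp [selecaoAltGo, hij, hfitI, hnovFJ, hc, hnovJ]]
      rw [show selecaoGo pop.length (fuel + 1) (pop.drop i) (fit.drop i) (nov.drop j) (novF.drop j) ret retFit
            = selecaoGo pop.length fuel (pop.drop i) (fit.drop i) (nov.drop (j + 1)) (novF.drop (j + 1))
                (ret ++ [nov[j]]) (retFit ++ [novF[j]]) by
        have hpp : PySem.List.pop? (nov.drop j) 0 = some (nov[j], nov.drop (j + 1)) := by
          rw [hdnov]; exact PySem.List.pop?_zero_cons _ _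
        have hpf : PySem.List.pop? (novF.drop j) 0 = some (novF[j], novF.drop (j + 1)) := by
          rw [hdnovF]; exact PySem.List.pop?_zero_cons _ _
        simp [selecaoGo, hret, hij, hfit, hnovF, hc, hpp, hpf]]
      exact ih i (j + 1) _ _ (by simp [hret]; omega) (by omega)

-- ===== VERDICT (by name: the statement is the Claim_ definition above) =====
theorem selecao_spec : Claim_equal_selecao := by
  intro pop fit nov novF _ hpre
  obtain ⟨h1, h2, h3⟩ := hpre
  unfold Spec_selecao selecao selecao_alt
  have := selecaoGo_eq_altGo pop fit nov novF h1 h2 h3 pop.length 0 0 [] [] rfl (by omega)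
  simpa using this
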